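-- pv_equiv track=rewrite | github.com/gsy/leetcode | subdomain_visit_count.py | parent_domain
-- ===== SOURCE A (Python) =====
-- def parent_domain(domain):
--     if '.' not in domain:
--         return []
--
--     domains = domain.split('.')
--     result = []
--     for i in range(1, len(domains)):
--         result.append(".".join(domains[i:]))
--     return result
-- ===== SOURCE B (Python) =====
-- def parent_domain(domain):
--     result = []
--     for p, c in enumerate(domain):
--         if c == '.':
--             result.append(domain[p + 1:])
--     return result
-- ===== Notes on version B (the rewrite author's own statement) =====
-- stated objective: simpler
-- what changed: B drops the split/join machinery: it scans the raw string once and for each dot at index p emits the slice domain[p+1:] directly, never building the list of parts.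
import Mathlib
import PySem

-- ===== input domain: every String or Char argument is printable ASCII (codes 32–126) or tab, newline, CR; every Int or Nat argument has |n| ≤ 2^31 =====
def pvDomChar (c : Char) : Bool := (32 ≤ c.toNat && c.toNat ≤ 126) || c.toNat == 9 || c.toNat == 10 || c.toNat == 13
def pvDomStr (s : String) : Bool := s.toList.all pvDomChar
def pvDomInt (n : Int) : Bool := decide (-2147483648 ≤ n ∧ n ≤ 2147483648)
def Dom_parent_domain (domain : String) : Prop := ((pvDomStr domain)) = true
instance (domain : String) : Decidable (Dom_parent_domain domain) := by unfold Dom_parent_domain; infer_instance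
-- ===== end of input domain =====

-- B scans the raw string once and emits domain[p+1:] for each '.' at index p,
-- instead of A's split('.') followed by joining every tail of the parts list (objective: simpler).


-- ===== PORT A =====
def parent_domain (domain : String) : List String :=
  if PySem.Str.isIn "." domain = false then []
  else
    -- domain.split('.'): the separator "." is non-empty, so Python's split never raises
    let domains := (PySem.Str.split? domain ".").getD []
    (PySem.List.pyRange 1 (domains.length : Int) 1).foldl
      (fun result i => result ++ [PySem.Str.join "." (PySem.List.slice domains (some i) none)]) []

-- ===== PORT B =====
def parent_domain_alt (domain : String) : List String :=
  (PySem.List.enumerate domain.toList 0).foldl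
    (fun result pc => if pc.2 == '.' then result ++ [PySem.Str.slice domain (some (pc.1 + 1)) none] else result) []

-- ===== PRECONDITION & SPEC =====
def Spec_parent_domain (domain : String) (out : List String) : Prop := out = parent_domain_alt domain
instance (domain : String) (out : List String) : Decidable (Spec_parent_domain domain out) := by unfold Spec_parent_domain; infer_instance

-- ===== CLAIM (what is proved, stated in full; the proofs are below) =====
def Claim_equal_parent_domain : Prop := ∀ (domain : String), Dom_parent_domain domain → Spec_parent_domain domain (parent_domain domain)

-- ===== LEMMAS AND PROOFS =====

/-- The list of suffixes after each '.' of `cs`: the common value of both ports. -/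
def sufs : List Char → List (List Char)
  | [] => []
  | c :: cs => (if c = '.' then [cs] else []) ++ sufs cs

/-- Structural version of Python's split on the single-char separator '.'. -/
def mySplit : List Char → List (List Char)
  | [] => [[]]
  | c :: cs =>
    if c = '.' then [] :: mySplit cs
    else match mySplit cs with
      | [] => [[c]]
      | h :: t => (c :: h) :: t

lemma mySplit_ne_nil (cs : List Char) : mySplit cs ≠ [] := by
  cases cs with
  | nil => simp [mySplit]
  | cons c cs =>
    simp only [mySplit]; split_ifs with h
    · simp
    · cases mySplit cs <;> simp

lemma splitOn_go_spec :
    ∀ (fuel : Nat) (l cur : List Char) (acc : List (List Char)), l.length < fuel →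
    PySem.Chars.splitOn.go ['.'] fuel l cur acc =
      acc.reverse ++ ((cur.reverse ++ (mySplit l).headI) :: (mySplit l).tail) := by
  intro fuel
  induction fuel with
  | zero => intro l cur acc h; omega
  | succ f ih =>
    intro l cur acc h
    cases l with
    | nil => simp [PySem.Chars.splitOn.go, mySplit]
    | cons c rest =>
      rw [PySem.Chars.splitOn.go]
      by_cases hc : c = '.'
      · subst hc
        have hpre : List.isPrefixOf ['.'] ('.' :: rest) = true := by
          simp [List.isPrefixOf]
        simp only [hpre, if_true]
        have hdrop : List.drop (['.'] : List Char).length ('.' :: rest) = rest := rfl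
        rw [hdrop, ih rest [] (cur.reverse :: acc) (by simpa using Nat.lt_of_succ_lt_succ h)]
        obtain ⟨hd, tl, hm⟩ : ∃ hd tl, mySplit rest = hd :: tl := by
          cases hmr : mySplit rest with
          | nil => exact absurd hmr (mySplit_ne_nil rest)
          | cons a b => exact ⟨a, b, rfl⟩
        simp [mySplit, hm]
      · have hpre : List.isPrefixOf ['.'] (c :: rest) = false := by
          simp [List.isPrefixOf]
          intro hcc; exact hc hcc.symm
        simp only [hpre, Bool.false_eq_true, if_false]
        rw [ih rest (c :: cur) acc (by simpa using Nat.lt_of_succ_lt_succ h)]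
        obtain ⟨hd, tl, hm⟩ : ∃ hd tl, mySplit rest = hd :: tl := by
          cases hmr : mySplit rest with
          | nil => exact absurd hmr (mySplit_ne_nil rest)
          | cons a b => exact ⟨a, b, rfl⟩
        simp [mySplit, hc, hm]

lemma splitOn_eq_mySplit (cs : List Char) :
    PySem.Chars.splitOn cs ['.'] = mySplit cs := by
  rw [PySem.Chars.splitOn, splitOn_go_spec (cs.length + 1) cs [] [] (by omega)]
  obtain ⟨hd, tl, hm⟩ : ∃ hd tl, mySplit cs = hd :: tl := by
    cases hmr : mySplit cs with
    | nil => exact absurd hmr (mySplit_ne_nil cs)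
    | cons a b => exact ⟨a, b, rfl⟩
  simp [hm]

lemma join_mySplit (cs : List Char) : PySem.Chars.join ['.'] (mySplit cs) = cs := by
  induction cs with
  | nil => simp [mySplit, PySem.Chars.join_singleton]
  | cons c cs ih =>
    by_cases hc : c = '.'
    · subst hc
      obtain ⟨hd, tl, hm⟩ : ∃ hd tl, mySplit cs = hd :: tl := by
        cases hmr : mySplit cs with
        | nil => exact absurd hmr (mySplit_ne_nil cs)
        | cons a b => exact ⟨a, b, rfl⟩
      rw [mySplit, if_pos rfl, hm, PySem.Chars.join_cons_cons]
      rw [hm] at ih; rw [ih]; rfl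
    · obtain ⟨hd, tl, hm⟩ : ∃ hd tl, mySplit cs = hd :: tl := by
        cases hmr : mySplit cs with
        | nil => exact absurd hmr (mySplit_ne_nil cs)
        | cons a b => exact ⟨a, b, rfl⟩
      rw [mySplit, if_neg hc, hm]
      rw [hm] at ih
      cases tl with
      | nil => simpa [PySem.Chars.join_singleton] using congrArg (c :: ·) ih
      | cons q t =>
        rw [PySem.Chars.join_cons_cons] at ih ⊢
        simpa using congrArg (c :: ·) ih

/-- Joins of the proper tails of a parts list. -/
def joinSufs : List (List Char) → List (List Char)
  | [] => []
  | [_] => []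
  | _ :: q :: t => PySem.Chars.join ['.'] (q :: t) :: joinSufs (q :: t)

lemma joinSufs_head_irrel (x y : List Char) (t : List (List Char)) :
    joinSufs (x :: t) = joinSufs (y :: t) := by
  cases t <;> simp [joinSufs]

lemma joinSufs_mySplit (cs : List Char) : joinSufs (mySplit cs) = sufs cs := by
  induction cs with
  | nil => simp [mySplit, joinSufs, sufs]
  | cons c cs ih =>
    obtain ⟨hd, tl, hm⟩ : ∃ hd tl, mySplit cs = hd :: tl := by
      cases hmr : mySplit cs with
      | nil => exact absurd hmr (mySplit_ne_nil cs)
      | cons a b => exact ⟨a, b, rfl⟩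
    by_cases hc : c = '.'
    · subst hc
      rw [mySplit, if_pos rfl, hm]
      have hjoin : PySem.Chars.join ['.'] (hd :: tl) = cs := by rw [← hm]; exact join_mySplit cs
      rw [hm] at ih
      simp [joinSufs, sufs, hjoin, ih]
    · rw [mySplit, if_neg hc, hm]
      rw [hm] at ih
      rw [joinSufs_head_irrel (c :: hd) hd tl, ih]
      simp [sufs, hc]

lemma sufs_of_not_mem (cs : List Char) (h : '.' ∉ cs) : sufs cs = [] := by
  induction cs with
  | nil => rfl
  | cons c cs ih =>
    simp only [List.mem_cons, not_or] at h
    simp [sufs, Ne.symm h.1, ih h.2]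

lemma range_tails (t : List (List Char)) (h : List Char) :
    (List.range t.length).map (fun k => PySem.Chars.join ['.'] (t.drop k)) = joinSufs (h :: t) := by
  induction t generalizing h with
  | nil => simp [joinSufs]
  | cons q t' ih =>
    rw [List.length_cons, List.range_succ_eq_map, List.map_cons, List.map_map]
    have : ((fun k => PySem.Chars.join ['.'] ((q :: t').drop k)) ∘ Nat.succ)
        = fun k => PySem.Chars.join ['.'] (t'.drop k) := by
      funext k; simp
    rw [this, ih q]
    simp [joinSufs]

lemma pyRange_one_eq (n : Nat) :
    PySem.List.pyRange 1 ((n + 1 : Nat) : Int) 1 = (List.range n).map (fun k => ((k + 1 : Nat) : Int)) := by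
  have h0 : PySem.List.pyRange 0 ((n + 1 : Nat) : Int) 1
      = 0 :: PySem.List.pyRange 1 ((n + 1 : Nat) : Int) 1 := by
    have := PySem.List.pyRange_one_cons (a := 0) (b := ((n + 1 : Nat) : Int)) (by exact_mod_cast Nat.succ_pos n)
    simpa using this
  have h1 := PySem.List.pyRange_zero_natCast (n + 1)
  rw [List.range_succ_eq_map, List.map_cons] at h1
  rw [h0] at h1
  have h2 := List.tail_eq_of_cons_eq h1
  rw [h2, List.map_map]
  congr 1

lemma A_chars (m : List String) (hd : String) (tl : List String) (hm : m = hd :: tl) :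
    ((PySem.List.pyRange 1 (m.length : Int) 1).map
      (fun i => PySem.Str.join "." (PySem.List.slice m (some i) none))).map String.toList
    = joinSufs (m.map String.toList) := by
  subst hm
  rw [List.length_cons, pyRange_one_eq tl.length, List.map_map, List.map_map]
  have : ((String.toList ∘ fun i => PySem.Str.join "." (PySem.List.slice (hd :: tl) (some i) none))
           ∘ fun k => ((k + 1 : Nat) : Int))
      = fun k => PySem.Chars.join ['.'] ((tl.map String.toList).drop k) := by
    funext k
    simp only [Function.comp_apply, PySem.List.slice_from_natCast, List.drop_succ_cons]
    simp [PySem.Str.join, List.map_drop]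
  rw [this]
  have := range_tails (tl.map String.toList) (hd.toList)
  rw [List.length_map] at this
  rw [this]
  rfl

lemma B_chars :
    ∀ (cs : List Char) (k : Nat) (full : List Char), full.drop k = cs →
    ((PySem.List.enumerate cs (k : Int)).filter (fun pc => pc.2 == '.')).map
      (fun pc => PySem.Chars.slice full (some (pc.1 + 1)) none) = sufs cs := by
  intro cs
  induction cs with
  | nil => intro k full h; simp [PySem.List.enumerate_nil, sufs]
  | cons c rest ih =>
    intro k full h
    have hrest : full.drop (k + 1) = rest := by
      rw [← List.drop_drop] at *
      · rw [h]; rfl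
    have hkk : (k : Int) + 1 = ((k + 1 : Nat) : Int) := by push_cast; ring
    rw [PySem.List.enumerate_cons, hkk]
    by_cases hc : c = '.'
    · subst hc
      rw [List.filter_cons_of_pos (by simp), List.map_cons]
      rw [ih (k + 1) full hrest]
      have hsl : PySem.Chars.slice full (some (((k : Int), '.').1 + 1)) none = rest := by
        show PySem.Chars.slice full (some ((k : Int) + 1)) none = rest
        rw [hkk, PySem.Chars.slice, PySem.List.slice_from_natCast, hrest]
      rw [hsl]
      simp [sufs]
    · rw [List.filter_cons_of_neg (by simp [hc]), ih (k + 1) full hrest]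
      simp [sufs, hc]

lemma toList_inj_map (xs ys : List String) (h : xs.map String.toList = ys.map String.toList) : xs = ys := by
  exact List.map_injective_iff.mpr (fun a b => String.toList_inj.mp) h

lemma alt_chars (domain : String) :
    (parent_domain_alt domain).map String.toList = sufs domain.toList := by
  unfold parent_domain_alt
  rw [PySem.List.foldl_append_if (fun pc => pc.2 == '.')
      (fun pc => PySem.Str.slice domain (some (pc.1 + 1)) none) (PySem.List.enumerate domain.toList 0) []]
  rw [List.nil_append, List.map_map]
  have : (String.toList ∘ fun pc : Int × Char => PySem.Str.slice domain (some (pc.1 + 1)) none)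
      = fun pc : Int × Char => PySem.Chars.slice domain.toList (some (pc.1 + 1)) none := by
    funext pc; simp [PySem.Str.slice]
  rw [this]
  exact B_chars domain.toList 0 domain.toList rfl

-- ===== VERDICT (by name: the statement is the Claim_ definition above) =====
theorem parent_domain_spec : Claim_equal_parent_domain := by
  intro domain _
  unfold Spec_parent_domain
  apply toList_inj_map
  rw [alt_chars]
  unfold parent_domain
  by_cases hin : PySem.Str.isIn "." domain = false
  · rw [if_pos hin]
    have hnotmem : '.' ∉ domain.toList := by
      intro hmem
      have htrue : PySem.Str.isIn "." domain = true := by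
        rw [PySem.Str.isIn_iff_infix]
        simpa using (List.singleton_infix_iff '.' domain.toList).mpr hmem
      rw [htrue] at hin
      exact absurd hin (by simp)
    rw [sufs_of_not_mem domain.toList hnotmem]
    rfl
  · rw [if_neg hin]
    -- domains = parts from split?, with parts.map toList = mySplit domain.toList
    have hsplit := PySem.Str.split?_map domain "."
    have hchars : PySem.Chars.split? domain.toList ['.'] = some (mySplit domain.toList) := by
      rw [PySem.Chars.split?]
      simp [splitOn_eq_mySplit]
    rw [show ("." : String).toList = ['.'] from rfl] at hsplit
    rw [hchars] at hsplit
    obtain ⟨parts, hp⟩ : ∃ parts, PySem.Str.split? domain "." = some parts := by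
      cases hsp : PySem.Str.split? domain "." with
      | none => rw [hsp] at hsplit; simp at hsplit
      | some p => exact ⟨p, rfl⟩
    rw [hp] at hsplit
    simp only [Option.map_some, Option.some.injEq] at hsplit
    simp only [hp, Option.getD_some]
    rw [PySem.List.foldl_append_singleton_eq_map
      (fun i => PySem.Str.join "." (PySem.List.slice parts (some i) none)) _ []]
    rw [List.nil_append]
    obtain ⟨hd, tl, hm⟩ : ∃ hd tl, parts = hd :: tl := by
      cases hpp : parts with
      | nil =>
        rw [hpp] at hsplit
        exact absurd hsplit.symm (by simpa using mySplit_ne_nil domain.toList)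
      | cons a b => exact ⟨a, b, rfl⟩
    rw [A_chars parts hd tl hm, hsplit, joinSufs_mySplit]
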